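-- pv_equiv track=rewrite | github.com/hyunjeekang/algorithm-study | jeongsiyeong/python/SWEA/launch_time.py | get_stair_time
-- ===== SOURCE A (Python) =====
-- def get_stair_time(team_dists, stair_len):
--     if not team_dists:
--         return 0
--
--     team_dists.sort()
--
--     q = []
--
--     for dist in team_dists:
--         arrival_time = dist + 1
--
--         if len(q) < 3:
--             q.append(arrival_time + stair_len)
--         else:
--             prev_finish_time = q.pop(0)
--
--             start_time = max(arrival_time, prev_finish_time)
--             q.append(start_time + stair_len)
--     return q[-1]
-- ===== SOURCE B (Python) =====
-- def get_stair_time(team_dists, stair_len):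
--     if not team_dists:
--         return 0
--
--     team_dists.sort()
--
--     # Teams occupy the three lanes round-robin, so team i waits only for
--     # team i - 3.  Only the lane containing the LAST team (indices
--     # (n-1) % 3, (n-1) % 3 + 3, ...) determines the answer: walk just it
--     # with one rolling finish time.
--     i = (len(team_dists) - 1) % 3
--     finish = None
--     while i < len(team_dists):
--         arrival = team_dists[i] + 1
--         finish = arrival + stair_len if finish is None else max(arrival, finish) + stair_len
--         i += 3
--     return finish
-- ===== Notes on version B (the rewrite author's own statement) =====
-- stated objective: alternative
-- what changed: B drops A's FIFO queue of three finish times: since team i always waits for team i-3, only the lane of the last team matters, so B walks just the indices (n-1)%3, (n-1)%3+3, ... with one rolling finish variable.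
import Mathlib
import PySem

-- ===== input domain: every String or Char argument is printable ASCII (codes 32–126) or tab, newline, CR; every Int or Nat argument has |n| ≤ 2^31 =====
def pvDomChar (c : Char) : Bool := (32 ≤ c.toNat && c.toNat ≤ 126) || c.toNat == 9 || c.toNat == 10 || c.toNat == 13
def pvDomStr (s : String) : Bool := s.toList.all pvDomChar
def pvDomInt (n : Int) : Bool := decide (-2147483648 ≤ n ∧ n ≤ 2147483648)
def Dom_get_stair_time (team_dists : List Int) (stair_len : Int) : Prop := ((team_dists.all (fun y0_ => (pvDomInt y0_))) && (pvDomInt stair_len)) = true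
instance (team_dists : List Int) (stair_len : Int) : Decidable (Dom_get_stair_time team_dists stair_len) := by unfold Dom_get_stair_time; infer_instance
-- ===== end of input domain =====

-- B replaces A's FIFO queue of three finish times by a single walk of the last
-- team's lane (indices (n-1)%3, (n-1)%3+3, ...) with one rolling variable: an
-- alternative decomposition of the same simulation.  Like A, B sorts its list
-- argument in place; the theorems below are about the return value.

-- ===== PORT A =====
def pvStepA (stair_len : Int) (q : List Int) (dist : Int) : List Int :=
  let arrival_time := dist + 1
  if q.length < 3 then q ++ [arrival_time + stair_len]
  else
    match PySem.List.pop? q 0 with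
    | some (prev_finish_time, q') =>
        q' ++ [max arrival_time prev_finish_time + stair_len]
    | none => q  -- unreachable: q is nonempty in this branch

def get_stair_time (team_dists : List Int) (stair_len : Int) : Int :=
  if team_dists = [] then 0
  else
    let l := PySem.List.sorted team_dists (fun x => x) false
    let q := l.foldl (pvStepA stair_len) []
    (PySem.List.pyGet? q (-1)).getD 0  -- q is nonempty here, so q[-1] never raises: exact

-- ===== PORT B =====
-- B's while-loop over i = (n-1)%3, (n-1)%3+3, ... ; `finish` is the rolling variable
def pvLaneB (l : List Int) (stair_len : Int) (finish : Option Int) (i : Nat) : Option Int :=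
  if h : i < l.length then
    pvLaneB l stair_len
      (some (match finish with
             | none => l[i] + 1 + stair_len
             | some f => max (l[i] + 1) f + stair_len))
      (i + 3)
  else finish
termination_by l.length - i

def get_stair_time_alt (team_dists : List Int) (stair_len : Int) : Int :=
  if team_dists = [] then 0
  else
    let l := PySem.List.sorted team_dists (fun x => x) false
    -- (len(l) - 1) % 3 : l is nonempty here, so Nat subtraction/mod agree with Python's
    match pvLaneB l stair_len none ((l.length - 1) % 3) with
    | some f => f
    | none => 0  -- unreachable: the loop body runs at least once

-- ===== PRECONDITION & SPEC =====
def Spec_get_stair_time (team_dists : List Int) (stair_len : Int) (out : Int) : Prop := out = get_stair_time_alt team_dists stair_len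
instance (team_dists : List Int) (stair_len : Int) (out : Int) : Decidable (Spec_get_stair_time team_dists stair_len out) := by unfold Spec_get_stair_time; infer_instance

-- ===== CLAIM (what is proved, stated in full; the proofs are below) =====
def Claim_equal_get_stair_time : Prop := ∀ (team_dists : List Int) (stair_len : Int), Dom_get_stair_time team_dists stair_len → Spec_get_stair_time team_dists stair_len (get_stair_time team_dists stair_len)

-- ===== LEMMAS AND PROOFS =====

-- one lane-step as a fold function
def pvG (s : Int) (f : Option Int) (d : Int) : Option Int :=
  some (match f with | none => d + 1 + s | some p => max (d + 1) p + s)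

-- every third element of a list, starting with the first
def pvEvery3 : List Int → List Int
  | [] => []
  | x :: xs => x :: pvEvery3 (xs.drop 2)
termination_by l => l.length
decreasing_by simp

-- finish time of the team at index i (the fold over its lane up to i), as a plain Int
def pvFin (l : List Int) (s : Int) (i : Nat) : Int :=
  ((pvEvery3 (l.drop (i % 3))).foldl (pvG s) none).getD 0

theorem pvEvery3_nil : pvEvery3 [] = [] := by rw [pvEvery3]

theorem pvEvery3_cons (x : Int) (xs : List Int) :
    pvEvery3 (x :: xs) = x :: pvEvery3 (xs.drop 2) := by rw [pvEvery3]

theorem pvLaneB_eq_foldl (l : List Int) (s : Int) :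
    ∀ (i : Nat) (f : Option Int), pvLaneB l s f i = (pvEvery3 (l.drop i)).foldl (pvG s) f := by
  suffices H : ∀ (k i : Nat), l.length - i ≤ k → ∀ f,
      pvLaneB l s f i = (pvEvery3 (l.drop i)).foldl (pvG s) f by
    intro i f; exact H l.length i (by omega) f
  intro k
  induction k with
  | zero =>
    intro i hk f
    rw [pvLaneB, dif_neg (by omega), List.drop_eq_nil_of_le (by omega), pvEvery3_nil,
      List.foldl_nil]
  | succ k ih =>
    intro i hk f
    rw [pvLaneB]
    by_cases h : i < l.length
    · rw [dif_pos h, List.drop_eq_getElem_cons h, pvEvery3_cons, List.drop_drop]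
      rw [ih (i + 3) (by omega)]
      rfl
    · rw [dif_neg h, List.drop_eq_nil_of_le (Nat.le_of_not_lt h), pvEvery3_nil, List.foldl_nil]

theorem foldl_pvG_isSome (s : Int) :
    ∀ (t : List Int) (o : Option Int), o.isSome → (t.foldl (pvG s) o).isSome := by
  intro t
  induction t with
  | nil => intro o h; exact h
  | cons y t ih => intro o _; exact ih _ (by simp [pvG])

theorem pvFin_some (l : List Int) (s : Int) (i : Nat) (h : i < l.length) :
    (pvEvery3 (l.drop (i % 3))).foldl (pvG s) none = some (pvFin l s i) := by
  have hlt : i % 3 < l.length := lt_of_le_of_lt (Nat.mod_le i 3) h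
  unfold pvFin
  rw [List.drop_eq_getElem_cons hlt, pvEvery3_cons, List.foldl_cons]
  obtain ⟨v, hv⟩ := Option.isSome_iff_exists.mp
    (foldl_pvG_isSome s (pvEvery3 ((l.drop (i % 3 + 1)).drop 2))
      (pvG s none l[i % 3]) (by simp [pvG]))
  rw [hv]
  rfl

theorem pvEvery3_append (ys : List Int) (x : Int) :
    pvEvery3 (ys ++ [x]) =
      if ys.length % 3 = 0 then pvEvery3 ys ++ [x] else pvEvery3 ys :=
  match ys with
  | [] => by simp [pvEvery3_cons, pvEvery3_nil]
  | [a] => by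
      rw [show ([a] : List Int) ++ [x] = [a, x] from rfl, pvEvery3_cons, pvEvery3_cons]
      simp [pvEvery3_nil]
  | [a, b] => by
      rw [show ([a, b] : List Int) ++ [x] = [a, b, x] from rfl, pvEvery3_cons, pvEvery3_cons]
      simp [pvEvery3_nil]
  | a :: b :: c :: t => by
      have ih := pvEvery3_append t x
      rw [show (a :: b :: c :: t) ++ [x] = a :: b :: c :: (t ++ [x]) from rfl,
        pvEvery3_cons, pvEvery3_cons,
        show List.drop 2 (b :: c :: (t ++ [x])) = t ++ [x] from rfl,
        show List.drop 2 (b :: c :: t) = t from rfl, ih]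
      have hm : (a :: b :: c :: t).length % 3 = t.length % 3 := by
        simp [List.length_cons]; omega
      rw [hm]
      split <;> simp
termination_by ys.length

-- pvFin over indices whose lane does not receive the appended element
theorem pvFin_stable (l : List Int) (x s : Int) (i : Nat) (hi : i < l.length)
    (hmod : i % 3 ≠ l.length % 3) :
    pvFin (l ++ [x]) s i = pvFin l s i := by
  unfold pvFin
  have hle : i % 3 ≤ l.length := le_of_lt (lt_of_le_of_lt (Nat.mod_le i 3) hi)
  rw [List.drop_append_of_le_length hle, pvEvery3_append]
  rw [if_neg (by simp only [List.length_drop]; omega)]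

-- pvFin at the appended index, small case (fewer than 3 teams before it)
theorem pvFin_new_small (l : List Int) (x s : Int) (h : l.length < 3) :
    pvFin (l ++ [x]) s l.length = x + 1 + s := by
  unfold pvFin
  have h3 : l.length % 3 = l.length := Nat.mod_eq_of_lt (by omega)
  rw [h3, List.drop_append_of_le_length (le_refl _), List.drop_length]
  simp [pvEvery3_cons, pvEvery3_nil, pvG]

-- pvFin at the appended index, general case: wait for the team 3 places back
theorem pvFin_new_big (l : List Int) (x s : Int) (h : 3 ≤ l.length) :
    pvFin (l ++ [x]) s l.length = max (x + 1) (pvFin l s (l.length - 3)) + s := by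
  have hmod : (l.length - 3) % 3 = l.length % 3 := by omega
  have hfold := pvFin_some l s (l.length - 3) (by omega)
  rw [hmod] at hfold
  rw [show pvFin (l ++ [x]) s l.length =
        ((pvEvery3 ((l ++ [x]).drop (l.length % 3))).foldl (pvG s) none).getD 0 from rfl]
  rw [List.drop_append_of_le_length (Nat.mod_le _ _), pvEvery3_append,
    if_pos (by simp only [List.length_drop]; omega), List.foldl_append, hfold]
  simp [pvG]

-- the queue after processing l holds the finish times of the last (up to 3) teams
theorem invA (s : Int) (l : List Int) :
    l.foldl (pvStepA s) [] =
      ((List.range l.length).drop (l.length - 3)).map (pvFin l s) := by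
  induction l using List.reverseRecOn with
  | nil => simp
  | append_singleton l x ih =>
    rw [List.foldl_append, List.foldl_cons, List.foldl_nil, ih]
    simp only [List.length_append, List.length_singleton]
    by_cases h : l.length < 3
    · -- queue not yet full: append
      rw [show l.length - 3 = 0 from by omega, show l.length + 1 - 3 = 0 from by omega,
        List.drop_zero, List.drop_zero]
      rw [show pvStepA s (List.map (pvFin l s) (List.range l.length)) x =
            List.map (pvFin l s) (List.range l.length) ++ [x + 1 + s] from by
          unfold pvStepA
          rw [if_pos (by simp only [List.length_map, List.length_range]; omega)]]
      rw [List.range_succ, List.map_append]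
      congr 1
      · refine List.map_congr_left fun i hi => ?_
        rw [List.mem_range] at hi
        exact (pvFin_stable l x s i hi (by
          rw [Nat.mod_eq_of_lt (by omega : i < 3), Nat.mod_eq_of_lt (by omega)]
          omega)).symm
      · simp [pvFin_new_small l x s h]
    · -- queue full: pop the head, push the new finish time
      obtain ⟨m, hm⟩ : ∃ m, l.length = m + 3 := ⟨l.length - 3, by omega⟩
      have hwin : ∀ (k : Nat), (List.range (k + 3)).drop k = [k, k + 1, k + 2] := by
        intro k
        rw [show List.range (k + 3) = List.range k ++ [k, k + 1, k + 2] from by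
              simp [List.range_succ],
          List.drop_append_of_le_length (by simp),
          List.drop_eq_nil_of_le (by simp), List.nil_append]
      rw [hm, Nat.add_sub_cancel, hwin m,
        show m + 3 + 1 - 3 = m + 1 from by omega,
        show m + 3 + 1 = m + 1 + 3 from by omega, hwin (m + 1)]
      simp only [List.map_cons, List.map_nil]
      have s1 : pvFin (l ++ [x]) s (m + 1) = pvFin l s (m + 1) :=
        pvFin_stable l x s (m + 1) (by omega) (by omega)
      have s2 : pvFin (l ++ [x]) s (m + 2) = pvFin l s (m + 2) :=
        pvFin_stable l x s (m + 2) (by omega) (by omega)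
      have s3 : pvFin (l ++ [x]) s (m + 1 + 2) = max (x + 1) (pvFin l s m) + s := by
        have hb := pvFin_new_big l x s (by omega)
        rw [hm, show m + 3 - 3 = m from by omega] at hb
        rw [show m + 1 + 2 = m + 3 from by omega]
        exact hb
      rw [s1, s2, s3]
      unfold pvStepA
      rw [if_neg (by simp)]
      rw [show PySem.List.pop? [pvFin l s m, pvFin l s (m + 1), pvFin l s (m + 2)] 0 =
            some (pvFin l s m, [pvFin l s (m + 1), pvFin l s (m + 2)]) from
          PySem.List.pop?_zero_cons _ _]
      rfl

-- ===== VERDICT (by name: the statement is the Claim_ definition above) =====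
theorem get_stair_time_spec : Claim_equal_get_stair_time := by
  unfold Claim_equal_get_stair_time
  intro team_dists stair_len _
  unfold Spec_get_stair_time get_stair_time get_stair_time_alt
  by_cases hnil : team_dists = []
  · simp [hnil]
  · rw [if_neg hnil, if_neg hnil]
    dsimp only
    set l := PySem.List.sorted team_dists (fun x => x) false with hl
    have hlne : l ≠ [] := by
      rw [hl]; intro h; exact hnil ((PySem.List.sorted_eq_nil_iff _ _ _).mp h)
    have hn : 1 ≤ l.length := List.length_pos_iff.mpr hlne
    have hB : pvLaneB l stair_len none ((l.length - 1) % 3) =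
        some (pvFin l stair_len (l.length - 1)) := by
      rw [pvLaneB_eq_foldl]
      exact pvFin_some l stair_len (l.length - 1) (by omega)
    rw [hB]
    rw [invA stair_len l, PySem.List.pyGet?_neg_one]
    by_cases h3 : l.length < 3
    · interval_cases h : l.length <;>
        simp_all [List.range_succ]
    · obtain ⟨m, hm⟩ : ∃ m, l.length = m + 3 := ⟨l.length - 3, by omega⟩
      rw [hm, Nat.add_sub_cancel,
        show List.range (m + 3) = List.range m ++ [m, m + 1, m + 2] from by
          simp [List.range_succ],
        List.drop_append_of_le_length (by simp),
        List.drop_eq_nil_of_le (by simp), List.nil_append]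
      simp only [List.map_cons, List.map_nil]
      rw [show m + 3 - 1 = m + 2 from by omega]
      rfl
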